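-- pv_equiv track=rewrite | github.com/fmwalle/Data_Stracture_excersise | Interview_standard2/stringExcersise/swaps.py | check_constraction
-- ===== SOURCE A (Python) =====
-- def check_constraction(word1,word2):
--    if not word1 and not word2:
--       return True
--    if not word1 or not word2:
--       return False
--    if len(word2)<len(word1):
--       return False
--    word1_map={}
--    word2_map={}
--
--    for chars in word1:
--       word1_map[chars]=word1_map.get(chars,0)+1
--    for chars in word2:
--      word2_map[chars]=word2_map.get(chars,0)+1
--
--    for keys,values in word1_map.items():
--         if word2_map.get(keys,0)<values:
--            return False
--
--
--    return True
-- ===== SOURCE B (Python) =====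
-- def check_constraction(word1, word2):
--     if not word1 and not word2:
--         return True
--     if not word1 or not word2:
--         return False
--     if len(word2) < len(word1):
--         return False
--     a = sorted(word1)
--     b = sorted(word2)
--     j = 0
--     for ch in a:
--         while j < len(b) and b[j] < ch:
--             j += 1
--         if j == len(b) or b[j] > ch:
--             return False
--         j += 1
--     return True
-- ===== Notes on version B (the rewrite author's own statement) =====
-- stated objective: alternative
-- what changed: Replaces the two hash-map frequency counters and the per-key comparison loop with sort-both-words and a single two-pointer merge that checks multiset containment.
import Mathlib
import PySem

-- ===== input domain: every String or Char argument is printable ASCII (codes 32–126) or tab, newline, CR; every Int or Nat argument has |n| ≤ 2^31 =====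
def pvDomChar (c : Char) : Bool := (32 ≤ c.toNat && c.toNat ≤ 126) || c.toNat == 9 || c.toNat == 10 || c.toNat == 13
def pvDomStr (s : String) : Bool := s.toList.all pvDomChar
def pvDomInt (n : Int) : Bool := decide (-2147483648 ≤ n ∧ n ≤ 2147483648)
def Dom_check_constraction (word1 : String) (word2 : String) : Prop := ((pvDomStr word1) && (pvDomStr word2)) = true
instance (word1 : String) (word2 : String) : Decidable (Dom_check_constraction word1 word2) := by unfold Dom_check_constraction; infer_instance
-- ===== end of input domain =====

-- B replaces A's two hash-map character counters with sort-both-words plus a two-pointer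
-- merge containment check (alternative algorithm, same return value on every input).

-- ===== PORT A =====
def check_constraction (word1 : String) (word2 : String) : Bool :=
  if word1.toList.isEmpty && word2.toList.isEmpty then true
  else if word1.toList.isEmpty || word2.toList.isEmpty then false
  else if PySem.Str.len word2 < PySem.Str.len word1 then false
  else
    let word1_map := word1.toList.foldl (fun d c => d.insert c (d.getD c 0 + 1)) (PySem.Dict.empty : PySem.Dict Char Int)
    let word2_map := word2.toList.foldl (fun d c => d.insert c (d.getD c 0 + 1)) (PySem.Dict.empty : PySem.Dict Char Int)
    -- 'for keys,values in word1_map.items(): if …: return False' as an all-fold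
    word1_map.items.all (fun kv => !(word2_map.getD kv.1 0 < kv.2))

-- ===== PORT B =====
-- the for/while two-pointer scan of Source B as structural recursion on the two sorted lists
def pvMerge : List Char → List Char → Bool
  | [], _ => true
  | _ :: _, [] => false
  | x :: a, y :: b =>
    if y < x then pvMerge (x :: a) b        -- advance the word2 pointer past smaller chars
    else if x < y then false                -- current word2 char larger than needed: fail
    else pvMerge a b                        -- exact match: consume both

def check_constraction_alt (word1 : String) (word2 : String) : Bool :=
  if word1.toList.isEmpty && word2.toList.isEmpty then true
  else if word1.toList.isEmpty || word2.toList.isEmpty then false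
  else if PySem.Str.len word2 < PySem.Str.len word1 then false
  else
    pvMerge (PySem.List.sorted word1.toList (fun c => c) false)
            (PySem.List.sorted word2.toList (fun c => c) false)

-- ===== PRECONDITION & SPEC =====
def Spec_check_constraction (word1 : String) (word2 : String) (out : Bool) : Prop := out = check_constraction_alt word1 word2
instance (word1 : String) (word2 : String) (out : Bool) : Decidable (Spec_check_constraction word1 word2 out) := by unfold Spec_check_constraction; infer_instance

-- ===== CLAIM (what is proved, stated in full; the proofs are below) =====
def Claim_equal_check_constraction : Prop := ∀ (word1 : String) (word2 : String), Dom_check_constraction word1 word2 → Spec_check_constraction word1 word2 (check_constraction word1 word2)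

-- ===== LEMMAS AND PROOFS =====

-- the two-pointer merge on sorted lists decides multiset containment (subpermutation)
lemma pvMerge_iff (b a : List Char) (ha : a.Pairwise (· ≤ ·)) (hb : b.Pairwise (· ≤ ·)) :
    pvMerge a b = true ↔ List.Subperm a b := by
  induction b generalizing a with
  | nil =>
    cases a with
    | nil => simp [pvMerge]
    | cons x a' => simp [pvMerge, List.subperm_nil]
  | cons y b' ih =>
    cases a with
    | nil => simp [pvMerge, List.nil_subperm]
    | cons x a' =>
      have hb' : b'.Pairwise (· ≤ ·) := hb.tail
      have hyb' : ∀ z ∈ b', y ≤ z := fun z hz => (List.pairwise_cons.mp hb).1 z hz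
      have hxa' : ∀ z ∈ a', x ≤ z := fun z hz => (List.pairwise_cons.mp ha).1 z hz
      by_cases hyx : y < x
      · rw [show pvMerge (x :: a') (y :: b') = pvMerge (x :: a') b' from by
          simp [pvMerge, hyx]]
        rw [ih (x :: a') ha hb']
        constructor
        · intro h; exact h.trans (List.sublist_cons_self y b').subperm
        · intro h
          rw [List.subperm_ext_iff] at h ⊢
          intro z hz
          have hzy : y < z := by
            rcases List.mem_cons.mp hz with rfl | hz'
            · exact hyx
            · exact lt_of_lt_of_le hyx (hxa' z hz')
          have := h z hz
          rwa [List.count_cons_of_ne hzy.ne] at this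
      · by_cases hxy : x < y
        · rw [show pvMerge (x :: a') (y :: b') = false from by simp [pvMerge, hyx, hxy]]
          simp only [Bool.false_eq_true, false_iff]
          intro h
          have hx : x ∈ y :: b' := h.subset List.mem_cons_self
          have hyx2 : y ≤ x := by
            rcases List.mem_cons.mp hx with rfl | hx'
            · exact le_refl x
            · exact hyb' x hx'
          exact absurd hxy (not_lt.mpr hyx2)
        · have hxeq : x = y := le_antisymm (not_lt.mp hyx) (not_lt.mp hxy)
          subst hxeq
          rw [show pvMerge (x :: a') (x :: b') = pvMerge a' b' from by simp [pvMerge]]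
          rw [ih a' ha.tail hb', List.subperm_cons]

-- A's counter comparison also decides subpermutation
lemma pvCounter_iff (l1 l2 : List Char) :
    ((l1.foldl (fun d c => d.insert c (d.getD c 0 + 1)) (PySem.Dict.empty : PySem.Dict Char Int)).items.all
      (fun kv => !((l2.foldl (fun d c => d.insert c (d.getD c 0 + 1)) (PySem.Dict.empty : PySem.Dict Char Int)).getD kv.1 0 < kv.2))) = true
      ↔ List.Subperm l1 l2 := by
  rw [PySem.Dict.foldl_insert_getD_add_one_eq_counter, PySem.Dict.foldl_insert_getD_add_one_eq_counter,
      PySem.Dict.items_counter, List.all_map, List.all_eq_true, List.subperm_ext_iff]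
  constructor
  · intro h z hz
    have := h z (by rwa [PySem.Set.mem_ofList])
    simp only [Function.comp, PySem.Dict.getD_counter, Bool.not_eq_eq_eq_not, Bool.not_true,
      decide_eq_false_iff_not, not_lt] at this
    exact_mod_cast this
  · intro h z hz
    simp only [Function.comp, PySem.Dict.getD_counter, Bool.not_eq_eq_eq_not, Bool.not_true,
      decide_eq_false_iff_not, not_lt]
    exact_mod_cast h z (by rwa [PySem.Set.mem_ofList] at hz)

-- sorted-then-merge decides subpermutation of the original lists
lemma pvMerge_sorted_iff (l1 l2 : List Char) :
    pvMerge (PySem.List.sorted l1 (fun c => c) false) (PySem.List.sorted l2 (fun c => c) false) = true ↔ List.Subperm l1 l2 := by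
  rw [pvMerge_iff _ _ (PySem.List.sorted_pairwise l1 (fun c => c)) (PySem.List.sorted_pairwise l2 (fun c => c))]
  exact ((PySem.List.sorted_perm l1 (fun c => c) false).subperm_right).trans
        ((PySem.List.sorted_perm l2 (fun c => c) false).subperm_left)

-- ===== VERDICT (by name: the statement is the Claim_ definition above) =====
theorem check_constraction_spec : Claim_equal_check_constraction := by
  intro word1 word2 _
  unfold Spec_check_constraction check_constraction check_constraction_alt
  split_ifs with h1 h2 h3
  · rfl
  · rfl
  · rfl
  · rw [Bool.eq_iff_iff, pvCounter_iff, pvMerge_sorted_iff]
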